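-- pv_equiv track=rewrite | github.com/Admia1/feshar | site2/polls/models.py | farsi
-- ===== SOURCE A (Python) =====
-- def farsi(x):
--     x=str(x)
--     num = {
--     '0':'۰',
--     '1':'۱',
--     '2':'۲',
--     '3':'۳',
--     '4':'۴',
--     '5':'۵',
--     '6':'۶',
--     '7':'۷',
--     '8':'۸',
--     '9':'۹',
--     }
--     for y in num:
--         x=x.replace(y,num[y])
--     return x
-- ===== SOURCE B (Python) =====
-- def farsi(x):
--     x = str(x)
--     num = {
--     '0':'۰',
--     '1':'۱',
--     '2':'۲',
--     '3':'۳',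
--     '4':'۴',
--     '5':'۵',
--     '6':'۶',
--     '7':'۷',
--     '8':'۸',
--     '9':'۹',
--     }
--     return ''.join(num.get(c, c) for c in x)
-- ===== Notes on version B (the rewrite author's own statement) =====
-- stated objective: idiomatic
-- what changed: A iterates over the 10-entry digit dict and rescans/rebuilds the whole string once per digit (10 full-string replace passes); B makes a single pass over the input characters, mapping each through the dict with num.get(c, c) and joining once.
import Mathlib
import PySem

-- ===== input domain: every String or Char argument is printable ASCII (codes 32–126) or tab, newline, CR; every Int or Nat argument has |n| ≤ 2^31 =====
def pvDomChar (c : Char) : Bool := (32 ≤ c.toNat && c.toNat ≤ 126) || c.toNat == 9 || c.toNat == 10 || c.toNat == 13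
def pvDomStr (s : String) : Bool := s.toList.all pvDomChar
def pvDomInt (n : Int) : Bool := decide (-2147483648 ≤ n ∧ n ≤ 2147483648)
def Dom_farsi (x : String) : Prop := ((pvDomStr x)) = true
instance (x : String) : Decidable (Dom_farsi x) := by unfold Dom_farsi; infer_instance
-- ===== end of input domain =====

-- B replaces A's ten full-string replace passes (one per dict key) with a single pass
-- mapping each input character through the digit table (objective: idiomatic, one pass).

-- ===== PORT A =====
-- the dict 'num' of A: ASCII digit → Farsi digit, in insertion order
def farsiNumA : PySem.Dict String String := PySem.Dict.mk
  [("0","۰"),("1","۱"),("2","۲"),("3","۳"),("4","۴"),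
   ("5","۵"),("6","۶"),("7","۷"),("8","۸"),("9","۹")]

-- 'for y in num: x = x.replace(y, num[y])' — fold over the dict entries in insertion order
def farsi (x : String) : String :=
  farsiNumA.items.foldl (fun s yv => PySem.Str.replace s yv.1 yv.2) x

-- ===== PORT B =====
-- the same dict, keyed by characters as Source B's num.get(c, c) uses them
def farsiNumB : PySem.Dict Char Char := PySem.Dict.mk
  [('0','۰'),('1','۱'),('2','۲'),('3','۳'),('4','۴'),
   ('5','۵'),('6','۶'),('7','۷'),('8','۸'),('9','۹')]

-- ''.join(num.get(c, c) for c in x) — one pass over the characters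
def farsi_alt (x : String) : String :=
  String.ofList (x.toList.map (fun c => farsiNumB.getD c c))

-- ===== PRECONDITION & SPEC =====
def Spec_farsi (x : String) (out : String) : Prop := out = farsi_alt x
instance (x : String) (out : String) : Decidable (Spec_farsi x out) := by unfold Spec_farsi; infer_instance

-- ===== CLAIM (what is proved, stated in full; the proofs are below) =====
def Claim_equal_farsi : Prop := ∀ (x : String), Dom_farsi x → Spec_farsi x (farsi x)

-- ===== LEMMAS AND PROOFS =====

-- str.replace with a single-character pattern and replacement is a per-character map
theorem replace_go_single (a b : Char) :
    ∀ (l : List Char) (fuel : Nat) (acc : List Char), l.length ≤ fuel →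
      PySem.Chars.replace.go [a] [b] fuel l acc
        = acc.reverse ++ l.map (fun c => if a == c then b else c) := by
  intro l
  induction l with
  | nil => intro fuel acc _; cases fuel <;> simp [PySem.Chars.replace.go]
  | cons c t ih =>
    intro fuel acc hf
    cases fuel with
    | zero => simp at hf
    | succ f =>
      by_cases h : a = c
      · subst h
        have hp : List.isPrefixOf [a] (a :: t) = true := by simp [List.isPrefixOf]
        simp only [PySem.Chars.replace.go, hp, if_true, List.length_nil,
          List.length_cons, Nat.zero_add, List.drop_succ_cons, List.drop_zero,
          List.reverse_cons, List.reverse_nil, List.nil_append, List.singleton_append]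
        rw [ih f (b :: acc) (by simpa using Nat.le_of_succ_le_succ hf)]
        simp
      · have hp : List.isPrefixOf [a] (c :: t) = false := by
          simp [List.isPrefixOf, h]
        simp only [PySem.Chars.replace.go, hp, Bool.false_eq_true, if_false]
        rw [ih f (c :: acc) (by simpa using Nat.le_of_succ_le_succ hf)]
        simp
        exact fun hc => absurd hc h

theorem replace_single (cs : List Char) (a b : Char) :
    PySem.Chars.replace cs [a] [b] = cs.map (fun c => if a == c then b else c) := by
  simp only [PySem.Chars.replace, List.isEmpty, Bool.false_eq_true, if_false]
  simpa using replace_go_single a b cs cs.length [] le_rfl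

-- ten successive per-character substitutions collapse to B's single dict lookup
theorem chain_list : ∀ l : List Char,
    (List.map (fun c => if ('9' == c) = true then '۹' else c)
      (List.map (fun c => if ('8' == c) = true then '۸' else c)
      (List.map (fun c => if ('7' == c) = true then '۷' else c)
      (List.map (fun c => if ('6' == c) = true then '۶' else c)
      (List.map (fun c => if ('5' == c) = true then '۵' else c)
      (List.map (fun c => if ('4' == c) = true then '۴' else c)
      (List.map (fun c => if ('3' == c) = true then '۳' else c)
      (List.map (fun c => if ('2' == c) = true then '۲' else c)
      (List.map (fun c => if ('1' == c) = true then '۱' else c)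
      (List.map (fun c => if ('0' == c) = true then '۰' else c)
      l))))))))))
      = List.map (fun c => farsiNumB.getD c c) l := by
  intro l
  induction l with
  | nil => simp
  | cons c t ih =>
    simp only [List.map_cons]
    rw [ih]
    refine congrArg (fun z => z :: List.map (fun c => farsiNumB.getD c c) t) ?_
    by_cases h0 : c = '0'; · subst h0; decide
    by_cases h1 : c = '1'; · subst h1; decide
    by_cases h2 : c = '2'; · subst h2; decide
    by_cases h3 : c = '3'; · subst h3; decide
    by_cases h4 : c = '4'; · subst h4; decide
    by_cases h5 : c = '5'; · subst h5; decide
    by_cases h6 : c = '6'; · subst h6; decide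
    by_cases h7 : c = '7'; · subst h7; decide
    by_cases h8 : c = '8'; · subst h8; decide
    by_cases h9 : c = '9'; · subst h9; decide
    have e0 : ('0' == c) = false := by simp; exact fun h => h0 h.symm
    have e1 : ('1' == c) = false := by simp; exact fun h => h1 h.symm
    have e2 : ('2' == c) = false := by simp; exact fun h => h2 h.symm
    have e3 : ('3' == c) = false := by simp; exact fun h => h3 h.symm
    have e4 : ('4' == c) = false := by simp; exact fun h => h4 h.symm
    have e5 : ('5' == c) = false := by simp; exact fun h => h5 h.symm
    have e6 : ('6' == c) = false := by simp; exact fun h => h6 h.symm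
    have e7 : ('7' == c) = false := by simp; exact fun h => h7 h.symm
    have e8 : ('8' == c) = false := by simp; exact fun h => h8 h.symm
    have e9 : ('9' == c) = false := by simp; exact fun h => h9 h.symm
    simp [farsiNumB, PySem.Dict.getD, PySem.Dict.get?, List.find?,
          e0, e1, e2, e3, e4, e5, e6, e7, e8, e9]

set_option maxHeartbeats 1000000 in
theorem farsi_eq_alt (x : String) : farsi x = farsi_alt x := by
  unfold farsi farsiNumA farsi_alt
  simp only [List.foldl_cons, List.foldl_nil, PySem.Str.replace,
    show ("0":String).toList = ['0'] from rfl, show ("۰":String).toList = ['۰'] from rfl,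
    show ("1":String).toList = ['1'] from rfl, show ("۱":String).toList = ['۱'] from rfl,
    show ("2":String).toList = ['2'] from rfl, show ("۲":String).toList = ['۲'] from rfl,
    show ("3":String).toList = ['3'] from rfl, show ("۳":String).toList = ['۳'] from rfl,
    show ("4":String).toList = ['4'] from rfl, show ("۴":String).toList = ['۴'] from rfl,
    show ("5":String).toList = ['5'] from rfl, show ("۵":String).toList = ['۵'] from rfl,
    show ("6":String).toList = ['6'] from rfl, show ("۶":String).toList = ['۶'] from rfl,
    show ("7":String).toList = ['7'] from rfl, show ("۷":String).toList = ['۷'] from rfl,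
    show ("8":String).toList = ['8'] from rfl, show ("۸":String).toList = ['۸'] from rfl,
    show ("9":String).toList = ['9'] from rfl, show ("۹":String).toList = ['۹'] from rfl,
    String.toList_ofList, replace_single]
  exact congrArg String.ofList (chain_list x.toList)

-- ===== VERDICT (by name: the statement is the Claim_ definition above) =====
theorem farsi_spec : Claim_equal_farsi := by
  intro x _
  unfold Spec_farsi
  exact farsi_eq_alt x
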